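-- pv_equiv track=rewrite | github.com/pineskyeo/test-automation | c_proto_parser.py | strip_preprocessor_blocks
-- ===== SOURCE A (Python) =====
-- from typing import List, Optional
--
-- def strip_preprocessor_blocks(text: str) -> str:
--     lines: List[str] = []
--     skipping = False
--     for line in text.splitlines():
--         stripped = line.lstrip()
--         if skipping:
--             if stripped.endswith("\\"):
--                 continue
--             skipping = False
--             continue
--
--         if stripped.startswith("#"):
--             skipping = stripped.endswith("\\")
--             continue
--
--         lines.append(line)
--     return "\n".join(lines)
-- ===== SOURCE B (Python) =====
-- def strip_preprocessor_blocks(text: str) -> str: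
--     lines = text.splitlines()
--     kept = []
--     i = 0
--     while i < len(lines):
--         s = lines[i].lstrip()
--         if s.startswith("#"):
--             i += 1
--             if s.endswith("\\"):
--                 # consume continuation lines, then the block's terminating line
--                 while i < len(lines) and lines[i].lstrip().endswith("\\"):
--                     i += 1
--                 i += 1
--         else:
--             kept.append(lines[i])
--             i += 1
--     return "\n".join(kept)
-- ===== Notes on version B (the rewrite author's own statement) =====
-- stated objective: alternative
-- what changed: Replaces the boolean skip-flag state machine threaded through a single for-loop with an index-based outer loop that consumes an entire backslash-continued directive block in a nested inner loop, keeping no mode flag.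
import Mathlib
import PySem

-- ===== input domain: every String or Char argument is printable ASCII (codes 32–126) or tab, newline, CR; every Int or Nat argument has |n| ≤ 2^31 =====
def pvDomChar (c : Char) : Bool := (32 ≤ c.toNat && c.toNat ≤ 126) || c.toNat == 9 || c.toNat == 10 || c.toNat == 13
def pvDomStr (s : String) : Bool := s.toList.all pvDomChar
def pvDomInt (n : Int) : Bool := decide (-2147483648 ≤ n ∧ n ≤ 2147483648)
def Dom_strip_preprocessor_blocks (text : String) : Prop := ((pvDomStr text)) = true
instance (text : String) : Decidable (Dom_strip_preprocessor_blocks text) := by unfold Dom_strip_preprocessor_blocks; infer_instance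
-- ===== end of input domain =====

-- B replaces A's boolean skip-flag state machine with a nested loop that consumes a whole
-- backslash-continued directive block at once (objective: alternative; same return value).


-- ===== PORT A =====
-- one iteration of A's for-loop: state = (kept lines, skipping flag)
def pvAStep (st : List String × Bool) (line : String) : List String × Bool :=
  let stripped := PySem.Str.lstrip line
  if st.2 then
    if PySem.Str.endswith stripped "\\" then st
    else (st.1, false)
  else if PySem.Str.startswith stripped "#" then
    (st.1, PySem.Str.endswith stripped "\\")
  else
    (st.1 ++ [line], st.2)

def strip_preprocessor_blocks (text : String) : String :=
  PySem.Str.join "\n" ((PySem.Str.splitlines text).foldl pvAStep ([], false)).1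

-- ===== PORT B =====
-- B's inner while-loop: drop continuation lines, then the block's terminating line
def pvDropBlock : List String → List String
  | [] => []
  | l :: rest =>
    if PySem.Str.endswith (PySem.Str.lstrip l) "\\" then pvDropBlock rest
    else rest

-- termination measure for the outer loop (cited by pvBLoop's decreasing_by)
theorem pvDropBlock_length_le (ls : List String) : (pvDropBlock ls).length ≤ ls.length := by
  induction ls with
  | nil => simp [pvDropBlock]
  | cons x xs ih =>
    simp only [pvDropBlock]
    split
    · exact Nat.le_succ_of_le ih
    · simp

-- B's outer while-loop over the remaining suffix of lines
def pvBLoop : List String → List String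
  | [] => []
  | l :: rest =>
    let s := PySem.Str.lstrip l
    if PySem.Str.startswith s "#" then
      if PySem.Str.endswith s "\\" then pvBLoop (pvDropBlock rest)
      else pvBLoop rest
    else l :: pvBLoop rest
  termination_by ls => ls.length
  decreasing_by all_goals
    (have h := pvDropBlock_length_le rest; simp only [List.length_cons]; omega)

def strip_preprocessor_blocks_alt (text : String) : String :=
  PySem.Str.join "\n" (pvBLoop (PySem.Str.splitlines text))

-- ===== PRECONDITION & SPEC =====
def Spec_strip_preprocessor_blocks (text : String) (out : String) : Prop := out = strip_preprocessor_blocks_alt text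
instance (text : String) (out : String) : Decidable (Spec_strip_preprocessor_blocks text out) := by unfold Spec_strip_preprocessor_blocks; infer_instance

-- ===== CLAIM (what is proved, stated in full; the proofs are below) =====
def Claim_equal_strip_preprocessor_blocks : Prop := ∀ (text : String), Dom_strip_preprocessor_blocks text → Spec_strip_preprocessor_blocks text (strip_preprocessor_blocks text)

-- ===== LEMMAS AND PROOFS =====

-- A's fold, started with either flag value, equals B's block-wise traversal.
theorem pvFold_eq (ls : List String) : ∀ acc : List String,
    ((ls.foldl pvAStep (acc, false)).1 = acc ++ pvBLoop ls) ∧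
    ((ls.foldl pvAStep (acc, true)).1 = acc ++ pvBLoop (pvDropBlock ls)) := by
  induction ls with
  | nil => intro acc; simp [pvBLoop, pvDropBlock]
  | cons l rest ih =>
    intro acc
    constructor
    · cases hs : PySem.Str.startswith (PySem.Str.lstrip l) "#" <;>
        cases he : PySem.Str.endswith (PySem.Str.lstrip l) "\\" <;>
        simp only [List.foldl_cons, pvAStep, pvBLoop, hs, he, Bool.false_eq_true, reduceIte] <;>
        first
          | exact (ih acc).1
          | exact (ih acc).2
          | simpa [List.append_assoc] using (ih (acc ++ [l])).1
    · cases he : PySem.Str.endswith (PySem.Str.lstrip l) "\\" <;>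
        simp only [List.foldl_cons, pvAStep, pvDropBlock, he, Bool.false_eq_true, reduceIte] <;>
        first
          | exact (ih acc).1
          | exact (ih acc).2

-- ===== VERDICT (by name: the statement is the Claim_ definition above) =====
theorem strip_preprocessor_blocks_spec : Claim_equal_strip_preprocessor_blocks := by
  intro text _
  unfold Spec_strip_preprocessor_blocks strip_preprocessor_blocks strip_preprocessor_blocks_alt
  rw [(pvFold_eq (PySem.Str.splitlines text) []).1, List.nil_append]
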